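-- pv_equiv track=rewrite | github.com/andreaoquendo/b8zs | LineCode.py | __ami
-- ===== SOURCE A (Python) =====
-- def __ami(bits):
--     up = True
--     digital_signal = []
--     for bit in bits:
--         if bit == 1:
--             if up:
--                 digital_signal.append(1)
--             else:
--                 digital_signal.append(2) #setup temporario
--             up = not up
--         else:
--             digital_signal.append(0)
--     return digital_signal
-- ===== SOURCE B (Python) =====
-- def __ami(bits):
--     bits = list(bits)
--     counts = []
--     c = 0
--     for b in bits:
--         c += (b == 1)
--         counts.append(c)
--     return [0 if b != 1 else (1 if c % 2 else 2) for b, c in zip(bits, counts)]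
-- ===== Notes on version B (the rewrite author's own statement) =====
-- stated objective: alternative
-- what changed: Replaces A's toggling polarity flag with a prefix count of ones followed by a second pass that maps each bit with its running count to 0/1/2 by parity.
import Mathlib
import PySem

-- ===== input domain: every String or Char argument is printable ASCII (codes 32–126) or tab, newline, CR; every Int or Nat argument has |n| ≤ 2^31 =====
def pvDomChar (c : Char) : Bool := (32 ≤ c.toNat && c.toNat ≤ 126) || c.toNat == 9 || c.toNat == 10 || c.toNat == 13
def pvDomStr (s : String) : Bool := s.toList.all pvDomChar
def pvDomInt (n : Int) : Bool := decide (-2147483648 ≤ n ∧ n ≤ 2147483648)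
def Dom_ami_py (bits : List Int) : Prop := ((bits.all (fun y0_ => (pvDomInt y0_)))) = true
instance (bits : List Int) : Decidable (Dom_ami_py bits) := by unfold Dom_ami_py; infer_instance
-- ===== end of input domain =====

-- B replaces A's toggling polarity flag with a prefix count of ones and a parity map; alternative decomposition, same cost.

-- ===== PORT A =====
-- A: one pass keeping a boolean 'up' toggled at each 1, appending 1/2/0.
def ami_py (bits : List Int) : List Int :=
  (bits.foldl (fun (s : Bool × List Int) bit =>
      if bit = 1 then
        (!s.1, s.2 ++ [if s.1 then (1 : Int) else 2])
      else
        (s.1, s.2 ++ [0]))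
    (true, [])).2

-- ===== PORT B =====
-- running inclusive prefix counts of ones (hand-written accumulate in Source B)
def amiCounts (c : Int) : List Int → List Int
  | [] => []
  | b :: bs =>
      let c' := c + (if b = 1 then 1 else 0)
      c' :: amiCounts c' bs

def ami_py_alt (bits : List Int) : List Int :=
  (bits.zip (amiCounts 0 bits)).map (fun p =>
    if p.1 ≠ 1 then (0 : Int) else if p.2 % 2 = 1 then 1 else 2)

-- ===== PRECONDITION & SPEC =====
def Spec_ami_py (bits : List Int) (out : List Int) : Prop := out = ami_py_alt bits
instance (bits : List Int) (out : List Int) : Decidable (Spec_ami_py bits out) := by unfold Spec_ami_py; infer_instance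

-- ===== CLAIM (what is proved, stated in full; the proofs are below) =====
def Claim_equal_ami_py : Prop := ∀ (bits : List Int), Dom_ami_py bits → Spec_ami_py bits (ami_py bits)

-- ===== LEMMAS AND PROOFS =====
theorem ami_loop (bits : List Int) : ∀ (c : Int) (up : Bool) (acc : List Int),
    (up = true ↔ c % 2 = 0) →
    (bits.foldl (fun (s : Bool × List Int) bit =>
        if bit = 1 then
          (!s.1, s.2 ++ [if s.1 then (1 : Int) else 2])
        else
          (s.1, s.2 ++ [0]))
      (up, acc)).2
      = acc ++ (bits.zip (amiCounts c bits)).map (fun p =>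
          if p.1 ≠ 1 then (0 : Int) else if p.2 % 2 = 1 then 1 else 2) := by
  induction bits with
  | nil => intro c up acc _; simp [List.foldl]
  | cons b bs ih =>
    intro c up acc h
    by_cases hb : b = 1
    · have h1 : ((!up) = true ↔ (c + 1) % 2 = 0) := by
        cases up <;> simp_all <;> omega
      have := ih (c + 1) (!up) (acc ++ [if up then (1 : Int) else 2]) h1
      simp only [List.foldl, amiCounts, hb, List.zip, List.zipWith, List.map, reduceIte] at *
      rw [this]
      have hemit : (if up then (1 : Int) else 2)
          = (if ¬(1 : Int) = 1 then (0 : Int) else if (c + 1) % 2 = 1 then 1 else 2) := by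
        cases up <;> simp_all
      simp [hemit]
    · have := ih c up (acc ++ [(0 : Int)]) h
      simp only [List.foldl, amiCounts, List.zip, List.zipWith, List.map, if_neg hb] at this ⊢
      rw [this]
      simp [hb]

-- ===== VERDICT (by name: the statement is the Claim_ definition above) =====
theorem ami_py_spec : Claim_equal_ami_py := by
  intro bits _
  unfold Spec_ami_py ami_py ami_py_alt
  have := ami_loop bits 0 true [] (by simp)
  simpa using this
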